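-- pv_equiv track=rewrite | github.com/0xNOCARRIER/presages-it-sio | main.py | check_win_condition
-- ===== SOURCE A (Python) =====
-- def check_win_condition(hands, teams):
--     """Détermine si une équipe remporte la manche (regles.md §FIN DE LA MANCHE).
--     Retourne (team_idx, winner_pid) ou None.
--     Priorité : un joueur à 0 carte (grâce à La Chance) > 1 carte (+ plus forte valeur)."""
--     zero = [pid for pid, h in hands.items() if len(h) == 0]
--     one  = [(pid, h) for pid, h in hands.items() if len(h) == 1]
--     if not zero and not one:
--         return None
--
--     def team_of(pid):
--         return next((i for i, t in enumerate(teams) if pid in t), -1)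
--
--     # 0 carte (La Chance) bat toujours 1 carte
--     if zero:
--         # S'il y en a plusieurs, on prend arbitrairement le premier pour ouvrir le round
--         winner_pid = zero[0]
--         return (team_of(winner_pid), winner_pid)
--
--     # Départage entre joueurs à 1 carte : plus forte valeur en main
--     best_pid, _ = max(one, key=lambda x: x[1][0]["value"])
--     return (team_of(best_pid), best_pid)
-- ===== SOURCE B (Python) =====
-- def check_win_condition(hands, teams):
--     """Select-by-sorting: rank every player with a total priority key
--     (0 = empty hand, 1 = one card ordered by descending value, 2 = still playing),
--     stably sort once and crown the head of the order if it can win."""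
--     def rank(item):
--         pid, h = item
--         if not h:
--             return (0, 0)
--         if len(h) == 1:
--             return (1, -h[0].get("value", 0))
--         return (2, 0)
--
--     order = sorted(hands.items(), key=rank)
--     if not order or rank(order[0])[0] == 2:
--         return None
--     winner = order[0][0]
--     team = next((i for i, t in enumerate(teams) if winner in t), -1)
--     return (team, winner)
-- ===== Notes on version B (the rewrite author's own statement) =====
-- stated objective: alternative
-- what changed: B replaces A's zero/one comprehensions plus max(..., key=...) by select-by-sorting: every player is ranked with one total priority key (0 = empty hand, 1 = one card ordered by descending value, 2 = otherwise), the items are stably sorted once by that key, and the head of the order wins unless its priority is 2.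
import Mathlib
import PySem

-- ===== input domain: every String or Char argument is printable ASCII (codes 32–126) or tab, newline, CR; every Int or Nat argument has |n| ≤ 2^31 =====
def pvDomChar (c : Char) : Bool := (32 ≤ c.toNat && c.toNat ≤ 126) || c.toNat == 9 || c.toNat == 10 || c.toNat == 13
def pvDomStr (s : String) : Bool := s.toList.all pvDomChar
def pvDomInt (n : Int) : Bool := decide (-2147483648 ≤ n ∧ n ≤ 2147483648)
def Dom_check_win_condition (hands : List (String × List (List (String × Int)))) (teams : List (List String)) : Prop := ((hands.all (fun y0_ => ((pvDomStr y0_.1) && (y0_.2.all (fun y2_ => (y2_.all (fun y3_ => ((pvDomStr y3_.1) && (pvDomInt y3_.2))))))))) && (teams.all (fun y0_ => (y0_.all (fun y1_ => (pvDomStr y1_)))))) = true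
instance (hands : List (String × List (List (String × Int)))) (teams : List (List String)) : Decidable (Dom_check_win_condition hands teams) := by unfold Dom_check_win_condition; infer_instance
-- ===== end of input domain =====

-- B replaces A's zero/one comprehensions + max(..., key=...) by select-by-sorting: one total
-- priority key per player, one stable sort, and the head of the order wins (alternative decomposition, similar cost).


-- ===== PORT A =====
-- team_of(pid): next((i for i, t in enumerate(teams) if pid in t), -1)  (identical helper in both Pythons)
def pvTeamOf (pid : String) : Nat → List (List String) → Int
  | _, [] => -1
  | i, t :: rest => if pid ∈ t then (i : Int) else pvTeamOf pid (i + 1) rest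

def check_win_condition (hands : List (String × List (List (String × Int)))) (teams : List (List String)) : Option (Int × String) :=
  let items := (PySem.Dict.ofList hands).items
  let zero := (items.filter (fun p => p.2.length == 0)).map (fun p => p.1)
  let one  := items.filter (fun p => p.2.length == 1)
  if zero = [] ∧ one = [] then none
  else if zero ≠ [] then
    let winner := PySem.List.pyGetD zero 0 ""
    some (pvTeamOf winner 0 teams, winner)
  else
    -- max(one, key=lambda x: x[1][0]["value"]); the KeyError on a card dict lacking "value" is excluded by Pre_
    match PySem.List.max? one (fun x => PySem.Dict.getD (PySem.Dict.ofList (PySem.List.pyGetD x.2 0 [])) "value" 0) with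
    | some b => some (pvTeamOf b.1 0 teams, b.1)
    | none => none  -- unreachable: this branch has one ≠ []

-- ===== PORT B =====
-- rank(item) returns a 2-tuple; ported as the two components rank1/rank2 fed to sorted2 (tuple key)
def pvRank1 (p : String × List (List (String × Int))) : Int :=
  if p.2 = [] then 0 else if p.2.length = 1 then 1 else 2

def pvRank2 (p : String × List (List (String × Int))) : Int :=
  if p.2 = [] then 0
  else if p.2.length = 1 then -(PySem.Dict.getD (PySem.Dict.ofList (PySem.List.pyGetD p.2 0 [])) "value" 0)
  else 0

def check_win_condition_alt (hands : List (String × List (List (String × Int)))) (teams : List (List String)) : Option (Int × String) :=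
  let items := (PySem.Dict.ofList hands).items
  let order := PySem.List.sorted2 items pvRank1 pvRank2
  match order with
  | [] => none
  | m :: _ =>
    if pvRank1 m = 2 then none
    else some (pvTeamOf m.1 0 teams, m.1)

-- ===== PRECONDITION & SPEC =====
-- Pre_ excludes exactly the inputs where Python A raises KeyError: no player has an empty hand
-- and some player holds exactly one card whose card dict lacks the key "value".
def Pre_check_win_condition (hands : List (String × List (List (String × Int)))) (teams : List (List String)) : Prop :=
  (∃ p ∈ (PySem.Dict.ofList hands).items, p.2.length = 0) ∨
  (∀ p ∈ (PySem.Dict.ofList hands).items, p.2.length = 1 →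
    (PySem.Dict.ofList (p.2.headD [])).contains "value" = true)
instance (hands : List (String × List (List (String × Int)))) (teams : List (List String)) : Decidable (Pre_check_win_condition hands teams) := by unfold Pre_check_win_condition; infer_instance

def pvWitness_check_win_condition : (List (String × List (List (String × Int)))) × List (List String) :=
  ([("a", []), ("b", [[("value", 3)]])], [["b"], ["a"]])

def Spec_check_win_condition (hands : List (String × List (List (String × Int)))) (teams : List (List String)) (out : Option (Int × String)) : Prop := out = check_win_condition_alt hands teams
instance (hands : List (String × List (List (String × Int)))) (teams : List (List String)) (out : Option (Int × String)) : Decidable (Spec_check_win_condition hands teams out) := by unfold Spec_check_win_condition; infer_instance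

-- ===== CLAIM (what is proved, stated in full; the proofs are below) =====
def Claim_equal_check_win_condition : Prop := ∀ (hands : List (String × List (List (String × Int)))) (teams : List (List String)), Dom_check_win_condition hands teams → Pre_check_win_condition hands teams → Spec_check_win_condition hands teams (check_win_condition hands teams)

-- ===== LEMMAS AND PROOFS =====

-- abbreviations used only by the proofs
abbrev pvItem : Type := String × List (List (String × Int))

def pvKeyA (x : pvItem) : Int :=
  PySem.Dict.getD (PySem.Dict.ofList (PySem.List.pyGetD x.2 0 [])) "value" 0

-- the strict lexicographic comparison sorted2/min2? both use, specialised to B's rank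
def pvLt (x m : pvItem) : Bool :=
  decide (pvRank1 x < pvRank1 m) || (!decide (pvRank1 m < pvRank1 x) && decide (pvRank2 x < pvRank2 m))

def pvStepB (acc : Option pvItem) (x : pvItem) : Option pvItem :=
  match acc with
  | none => some x
  | some m => if pvLt x m then some x else some m

def pvStepA (acc : Option pvItem) (x : pvItem) : Option pvItem :=
  match acc with
  | none => some x
  | some m => if pvKeyA m < pvKeyA x then some x else some m

-- head of a stable insertion-sort fold = the first-minimum fold (generic in the comparison)
theorem pv_head_foldl_insertBy (before : pvItem → pvItem → Bool) :
    ∀ (xs : List pvItem) (acc : List pvItem),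
      (xs.foldl (fun a x => PySem.List.insertBy before x a) acc).head?
        = xs.foldl (fun (o : Option pvItem) x =>
            match o with
            | none => some x
            | some m => if before x m then some x else some m) acc.head? := by
  intro xs
  induction xs with
  | nil => intro acc; rfl
  | cons x rest ih =>
    intro acc
    have hstep : (PySem.List.insertBy before x acc).head?
        = (match acc.head? with
           | none => some x
           | some m => if before x m then some x else some m) := by
      cases acc with
      | nil => rfl
      | cons y ys =>
        by_cases h : before x y = true <;> simp [PySem.List.insertBy, h]
    simp only [List.foldl_cons, ih, hstep]

-- sorted2's head is min2? (first minimal element under the lex key)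
theorem pv_head_sorted2 (xs : List pvItem) :
    (PySem.List.sorted2 xs pvRank1 pvRank2).head? = xs.foldl pvStepB none := by
  show (xs.foldl (fun a x => PySem.List.insertBy (fun a b => pvLt a b) x a) []).head?
      = xs.foldl pvStepB none
  rw [pv_head_foldl_insertBy]
  rfl

-- a zero-hand accumulator is never replaced
theorem pv_keep_zero (xs : List pvItem) (m : pvItem) (hm : m.2 = []) :
    xs.foldl pvStepB (some m) = some m := by
  induction xs with
  | nil => rfl
  | cons x rest ih =>
    have hlt : pvLt x m = false := by
      simp only [pvLt, pvRank1, pvRank2, hm]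
      by_cases hx : x.2 = []
      · simp [hx]
      · by_cases h1 : x.2.length = 1 <;> simp [hx, h1]
    simp only [List.foldl_cons, pvStepB, hlt, Bool.false_eq_true]
    exact ih

-- with a zero hand present, the fold returns the FIRST zero-hand item
theorem pv_fold_first_zero :
    ∀ (xs : List pvItem) (acc : Option pvItem), (∀ m, acc = some m → m.2 ≠ []) →
      ∀ z zs, xs.filter (fun p => p.2.length == 0) = z :: zs →
        xs.foldl pvStepB acc = some z := by
  intro xs
  induction xs with
  | nil => intro acc _ z zs h; simp at h
  | cons x rest ih =>
    intro acc hacc z zs hf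
    by_cases hx : x.2 = []
    · have hx0 : (x.2.length == 0) = true := by simp [hx]
      rw [List.filter_cons, if_pos hx0] at hf
      injection hf with h1 h2
      subst h1
      have hstep : pvStepB acc x = some x := by
        cases acc with
        | none => rfl
        | some m =>
          have hm := hacc m rfl
          have hlt : pvLt x m = true := by
            simp only [pvLt, pvRank1, pvRank2, hx]
            by_cases h1 : m.2.length = 1 <;> simp [hm, h1]
          simp [pvStepB, hlt]
      simp only [List.foldl_cons, hstep]
      exact pv_keep_zero rest x hx
    · have hx0 : ¬ ((x.2.length == 0) = true) := by simp [List.length_eq_zero_iff, hx]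
      rw [List.filter_cons, if_neg hx0] at hf
      have hacc' : ∀ m, pvStepB acc x = some m → m.2 ≠ [] := by
        intro m hsm
        cases acc with
        | none => cases hsm; exact hx
        | some m0 =>
          have hm0 := hacc m0 rfl
          simp only [pvStepB] at hsm
          by_cases hlt : pvLt x m0 = true
          · rw [if_pos hlt] at hsm; cases hsm; exact hx
          · rw [if_neg hlt] at hsm; cases hsm; exact hm0
      simp only [List.foldl_cons]
      exact ih (pvStepB acc x) hacc' z zs hf

-- the coupling invariant for the no-zero case
def pvR (accB accA : Option pvItem) : Prop :=
  (accA = none ∧ (accB = none ∨ ∃ t, accB = some t ∧ t.2 ≠ [] ∧ t.2.length ≠ 1)) ∨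
  (∃ m, accB = some m ∧ accA = some m ∧ m.2.length = 1)

theorem pv_fold_one :
    ∀ (xs : List pvItem), (∀ p ∈ xs, p.2 ≠ []) →
      ∀ accB accA, pvR accB accA →
        pvR (xs.foldl pvStepB accB) ((xs.filter (fun p => p.2.length == 1)).foldl pvStepA accA) := by
  intro xs
  induction xs with
  | nil => intro _ accB accA h; exact h
  | cons x rest ih =>
    intro hnz accB accA hR
    have hxnz : x.2 ≠ [] := hnz x List.mem_cons_self
    have hrest : ∀ p ∈ rest, p.2 ≠ [] := fun p hp => hnz p (List.mem_cons_of_mem _ hp)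
    by_cases h1 : x.2.length = 1
    · have hf : (x.2.length == 1) = true := by simp [h1]
      rw [List.filter_cons, if_pos hf]
      simp only [List.foldl_cons]
      apply ih hrest
      -- one step preserves pvR when x is a one-card item
      rcases hR with ⟨hA, hB⟩ | ⟨m, hBm, hAm, hm1⟩
      · subst hA
        rcases hB with hB | ⟨t, hBt, htnz, ht1⟩
        · subst hB; exact Or.inr ⟨x, rfl, rfl, h1⟩
        · subst hBt
          have hr1x : pvRank1 x = 1 := by simp [pvRank1, hxnz, h1]
          have ht2 : pvRank1 t = 2 := by simp [pvRank1, htnz, ht1]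
          have hlt : pvLt x t = true := by simp [pvLt, hr1x, ht2]
          exact Or.inr ⟨x, by simp [pvStepB, hlt], rfl, h1⟩
      · subst hBm; subst hAm
        have hmnz : m.2 ≠ [] := by intro h; rw [h] at hm1; simp at hm1
        have hr1x : pvRank1 x = 1 := by simp [pvRank1, hxnz, h1]
        have hr1m : pvRank1 m = 1 := by simp [pvRank1, hmnz, hm1]
        have hr2x : pvRank2 x = -pvKeyA x := by simp [pvRank2, pvKeyA, hxnz, h1]
        have hr2m : pvRank2 m = -pvKeyA m := by simp [pvRank2, pvKeyA, hmnz, hm1]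
        by_cases hk : pvKeyA m < pvKeyA x
        · have hlt : pvLt x m = true := by
            simp only [pvLt, hr1x, hr1m, hr2x, hr2m]
            simp only [lt_irrefl, decide_false, Bool.false_or, Bool.not_false, Bool.true_and,
              decide_eq_true_eq]
            omega
          exact Or.inr ⟨x, by simp [pvStepB, hlt], by simp [pvStepA, hk], h1⟩
        · have hlt : pvLt x m = false := by
            simp only [pvLt, hr1x, hr1m, hr2x, hr2m]
            simp only [lt_irrefl, decide_false, Bool.false_or, Bool.not_false, Bool.true_and,
              decide_eq_false_iff_not]
            omega
          exact Or.inr ⟨m, by simp [pvStepB, hlt], by simp [pvStepA, hk], hm1⟩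
    · have hf : ¬ ((x.2.length == 1) = true) := by simp [h1]
      rw [List.filter_cons, if_neg hf]
      simp only [List.foldl_cons]
      apply ih hrest
      -- x is a ≥2-card item: it enters accB only when accA is still none
      rcases hR with ⟨hA, hB⟩ | ⟨m, hBm, hAm, hm1⟩
      · subst hA
        rcases hB with hB | ⟨t, hBt, htnz, ht1⟩
        · subst hB; exact Or.inl ⟨rfl, Or.inr ⟨x, rfl, hxnz, h1⟩⟩
        · subst hBt
          by_cases hlt : pvLt x t = true
          · exact Or.inl ⟨rfl, Or.inr ⟨x, by simp [pvStepB, hlt], hxnz, h1⟩⟩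
          · exact Or.inl ⟨rfl, Or.inr ⟨t, by simp [pvStepB, hlt], htnz, ht1⟩⟩
      · subst hBm; subst hAm
        have hlt : pvLt x m = false := by
          have hx2 : pvRank1 x = 2 := by simp [pvRank1, hxnz, h1]
          have hm1' : pvRank1 m = 1 := by
            have hmnz : m.2 ≠ [] := by intro h; rw [h] at hm1; simp at hm1
            simp [pvRank1, hmnz, hm1]
          simp [pvLt, hx2, hm1']
        exact Or.inr ⟨m, by simp [pvStepB, hlt], rfl, hm1⟩

-- a pvStepA fold started from some never returns none
theorem pv_stepA_ne_none : ∀ (xs : List pvItem) (m : pvItem), xs.foldl pvStepA (some m) ≠ none := by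
  intro xs
  induction xs with
  | nil => intro m h; cases h
  | cons a as ih =>
    intro m
    have hstep : pvStepA (some m) a = if pvKeyA m < pvKeyA a then some a else some m := rfl
    by_cases h : pvKeyA m < pvKeyA a
    · rw [List.foldl_cons, hstep, if_pos h]; exact ih a
    · rw [List.foldl_cons, hstep, if_neg h]; exact ih m

-- A's max? over the one-card list IS the pvStepA fold from none
theorem pv_maxA (one : List pvItem) :
    PySem.List.max? one (fun x => PySem.Dict.getD (PySem.Dict.ofList (PySem.List.pyGetD x.2 0 [])) "value" 0)
      = one.foldl pvStepA none := by
  simp only [PySem.List.max?]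
  apply PySem.List.foldl_congr_mem
  intro acc x _
  cases acc <;> rfl

-- ===== VERDICT (by name: the statement is the Claim_ definition above) =====
theorem check_win_condition_spec : Claim_equal_check_win_condition := by
  intro hands teams _ _
  unfold Spec_check_win_condition check_win_condition check_win_condition_alt
  set items := (PySem.Dict.ofList hands).items with hitems
  have hhead := pv_head_sorted2 items
  by_cases hz : ∃ p ∈ items, p.2 = []
  · -- a zero hand exists: both return the first empty-handed player
    have hzf : items.filter (fun p => p.2.length == 0) ≠ [] := by
      obtain ⟨p, hp, hpe⟩ := hz
      intro h
      have : p ∈ items.filter (fun p => p.2.length == 0) := by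
        simp [List.mem_filter, hp, hpe]
      rw [h] at this; simp at this
    obtain ⟨z, zs, hzcons⟩ := List.exists_cons_of_ne_nil hzf
    have hfold : items.foldl pvStepB none = some z :=
      pv_fold_first_zero items none (by intro m h; cases h) z zs hzcons
    have hzne : (items.filter (fun p => p.2.length == 0)).map (fun p => p.1) ≠ [] := by
      simp [hzcons]
    have hwin : PySem.List.pyGetD ((items.filter (fun p => p.2.length == 0)).map (fun p => p.1)) 0 "" = z.1 := by
      simp [hzcons, PySem.List.pyGetD, PySem.List.pyIdx?, PySem.List.pyGet?]
    have hr1 : pvRank1 z ≠ 2 := by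
      have : z ∈ items.filter (fun p => p.2.length == 0) := by simp [hzcons]
      have hz2 : z.2 = [] := by
        have := (List.mem_filter.mp this).2
        simpa [List.length_eq_zero_iff] using this
      simp [pvRank1, hz2]
    rw [hfold] at hhead
    cases horder : PySem.List.sorted2 items pvRank1 pvRank2 with
    | nil => rw [horder] at hhead; simp at hhead
    | cons m rest =>
      rw [horder] at hhead
      simp only [List.head?_cons] at hhead
      have hm : m = z := by injection hhead
      subst hm
      simp [hzne, hwin, hr1, horder]
  · -- no zero hand: A's one-card max versus B's head, coupled by pvR
    push Not at hz
    have hzf : items.filter (fun p => p.2.length == 0) = [] := by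
      rw [List.filter_eq_nil_iff]
      intro p hp
      simp [List.length_eq_zero_iff]
      exact hz p hp
    have hzero_map : (items.filter (fun p => p.2.length == 0)).map (fun p => p.1) = [] := by
      simp [hzf]
    have hcoupled := pv_fold_one items hz none none (Or.inl ⟨rfl, Or.inl rfl⟩)
    rcases hcoupled with ⟨hA, hB⟩ | ⟨m, hBm, hAm, hm1⟩
    · -- no one-card hand either: both none
      have hone : items.filter (fun p => p.2.length == 1) = [] := by
        by_contra hne
        obtain ⟨o, os, ho⟩ := List.exists_cons_of_ne_nil hne
        rw [ho] at hA
        exact pv_stepA_ne_none os o (by simpa using hA)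
      rcases hB with hB | ⟨t, hBt, htnz, ht1⟩
      · rw [hB] at hhead
        have : PySem.List.sorted2 items pvRank1 pvRank2 = [] := by
          cases h : PySem.List.sorted2 items pvRank1 pvRank2 with
          | nil => rfl
          | cons a b => rw [h] at hhead; simp at hhead
        simp [hzero_map, hone, this]
      · rw [hBt] at hhead
        have hr2 : pvRank1 t = 2 := by simp [pvRank1, htnz, ht1]
        cases horder : PySem.List.sorted2 items pvRank1 pvRank2 with
        | nil => rw [horder] at hhead; simp at hhead
        | cons a b =>
          rw [horder] at hhead
          simp only [List.head?_cons] at hhead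
          have ha : a = t := by injection hhead
          subst ha
          simp [hzero_map, hone, hr2, horder]
    · -- both pick the same one-card winner m
      have hone : items.filter (fun p => p.2.length == 1) ≠ [] := by
        intro h; rw [h] at hAm; simp at hAm
      rw [hBm] at hhead
      have hr1 : pvRank1 m ≠ 2 := by
        have hmnz : m.2 ≠ [] := by intro h; rw [h] at hm1; simp at hm1
        simp [pvRank1, hmnz, hm1]
      cases horder : PySem.List.sorted2 items pvRank1 pvRank2 with
      | nil => rw [horder] at hhead; simp at hhead
      | cons a b =>
        rw [horder] at hhead
        simp only [List.head?_cons] at hhead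
        have ha : a = m := by injection hhead
        subst ha
        simp [hzero_map, hone, hr1, hAm, horder, pv_maxA]
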